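-- pv_equiv track=rewrite | github.com/AdeptSoftware/CatherineBot.v.1.3d | core/vainglory/func.py | convert_rank
-- ===== SOURCE A (Python) =====
-- def convert_rank(pts):
--     _list = [["1б", 0],     ["1с", 109],   ["1з", 218],
--              ["2б", 327],   ["2с", 436],   ["2з", 545],
--              ["3б", 654],   ["3с", 763],   ["3з", 872],
--              ["4б", 981],   ["4с", 1090],  ["4з", 1200],
--              ["5б", 1250],  ["5с", 1300],  ["5з", 1350],
--              ["6б", 1400],  ["6с", 1467],  ["6з", 1533],
--              ["7б", 1600],  ["7с", 1667],  ["7з", 1733],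
--              ["8б", 1800],  ["8с", 1867],  ["8з", 1933],
--              ["9б", 2000],  ["9с", 2134],  ["9з", 2267],
--              ["10б", 2400], ["10с", 2600], ["10з", 2800],
--              ["∞", 3000]]
--
--     for i in range(1, len(_list)):
--         if _list[i-1][1] <= pts < _list[i][1]:
--             return _list[i-1][0] + ' ('+str(int(pts))+')'
--     if pts < 0:
--         return "no rank"
--     return str(int(pts))
-- ===== SOURCE B (Python) =====
-- def convert_rank(pts):
--     thresholds = [0, 109, 218, 327, 436, 545, 654, 763, 872, 981,
--                   1090, 1200, 1250, 1300, 1350, 1400, 1467, 1533, 1600, 1667,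
--                   1733, 1800, 1867, 1933, 2000, 2134, 2267, 2400, 2600, 2800, 3000]
--     labels = ["1б", "1с", "1з", "2б", "2с", "2з", "3б", "3с", "3з", "4б",
--               "4с", "4з", "5б", "5с", "5з", "6б", "6с", "6з", "7б", "7с",
--               "7з", "8б", "8с", "8з", "9б", "9с", "9з", "10б", "10с", "10з"]
--     # hand-written bisect_right: first index whose threshold exceeds pts
--     lo, hi = 0, len(thresholds)
--     while lo < hi:
--         mid = (lo + hi) // 2
--         if thresholds[mid] <= pts:
--             lo = mid + 1
--         else:
--             hi = mid
--     if lo == 0: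
--         return "no rank"
--     if lo == len(thresholds):
--         return str(int(pts))
--     return labels[lo - 1] + ' (' + str(int(pts)) + ')'
-- ===== Notes on version B (the rewrite author's own statement) =====
-- stated objective: alternative
-- what changed: Replaces A's linear scan over consecutive [lower,upper) interval pairs by a flat thresholds table queried with a hand-written bisect_right binary search; the index found decides between 'no rank', the numeric string, and the label lookup.
import Mathlib
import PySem

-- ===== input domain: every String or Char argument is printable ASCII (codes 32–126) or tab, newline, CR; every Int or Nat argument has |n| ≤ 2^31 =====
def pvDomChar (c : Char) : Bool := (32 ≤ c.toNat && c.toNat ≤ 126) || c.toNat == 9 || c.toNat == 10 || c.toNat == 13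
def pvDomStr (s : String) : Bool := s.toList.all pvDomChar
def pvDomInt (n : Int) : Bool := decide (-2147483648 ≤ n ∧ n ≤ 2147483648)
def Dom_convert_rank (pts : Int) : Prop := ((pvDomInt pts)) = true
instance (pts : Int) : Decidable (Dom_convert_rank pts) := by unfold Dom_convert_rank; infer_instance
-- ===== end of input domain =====

-- B replaces A's linear scan over 30 consecutive threshold intervals by a hand-written
-- binary search (bisect_right) over a flat thresholds list — objective: alternative
-- (idiomatic threshold-table lookup); same exact return values.

-- ===== PORT A =====
-- A's rank table, as in the Python source (label, lower threshold).
def pvTableA : List (String × Int) :=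
  [("1б", 0),    ("1с", 109),  ("1з", 218),
   ("2б", 327),  ("2с", 436),  ("2з", 545),
   ("3б", 654),  ("3с", 763),  ("3з", 872),
   ("4б", 981),  ("4с", 1090), ("4з", 1200),
   ("5б", 1250), ("5с", 1300), ("5з", 1350),
   ("6б", 1400), ("6с", 1467), ("6з", 1533),
   ("7б", 1600), ("7с", 1667), ("7з", 1733),
   ("8б", 1800), ("8с", 1867), ("8з", 1933),
   ("9б", 2000), ("9с", 2134), ("9з", 2267),
   ("10б", 2400),("10с", 2600),("10з", 2800),
   ("∞", 3000)]

-- the for-loop with early return: first i in range(1, len) whose interval contains pts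
def convert_rank (pts : Int) : String :=
  let r := (PySem.List.pyRange 1 (Int.ofNat pvTableA.length) 1).foldl
    (fun acc i =>
      match acc with
      | some s => some s
      | none =>
        -- _list[i-1][1] <= pts < _list[i][1]; indices are always in range here
        let p := PySem.List.pyGetD pvTableA (i - 1) ("", 0)
        let q := PySem.List.pyGetD pvTableA i ("", 0)
        if p.2 ≤ pts ∧ pts < q.2 then
          some (p.1 ++ " (" ++ PySem.Int.toStr pts ++ ")")
        else none) none
  match r with
  | some s => s
  | none => if pts < 0 then "no rank" else PySem.Int.toStr pts

-- ===== PORT B =====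
def pvThresholds : List Int :=
  [0, 109, 218, 327, 436, 545, 654, 763, 872, 981,
   1090, 1200, 1250, 1300, 1350, 1400, 1467, 1533, 1600, 1667,
   1733, 1800, 1867, 1933, 2000, 2134, 2267, 2400, 2600, 2800, 3000]

def pvLabels : List String :=
  ["1б", "1с", "1з", "2б", "2с", "2з", "3б", "3с", "3з", "4б",
   "4с", "4з", "5б", "5с", "5з", "6б", "6с", "6з", "7б", "7с",
   "7з", "8б", "8с", "8з", "9б", "9с", "9з", "10б", "10с", "10з"]

-- Source B's hand-written bisect_right while-loop, step for step
def pvBsr (pts : Int) (lo hi : Nat) : Nat :=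
  if lo < hi then
    let mid := (lo + hi) / 2
    if PySem.List.pyGetD pvThresholds (Int.ofNat mid) 0 ≤ pts then
      pvBsr pts (mid + 1) hi
    else
      pvBsr pts lo mid
  else lo
termination_by hi - lo
decreasing_by all_goals omega

def convert_rank_alt (pts : Int) : String :=
  let lo := pvBsr pts 0 pvThresholds.length
  if lo = 0 then "no rank"
  else if lo = pvThresholds.length then PySem.Int.toStr pts
  else PySem.List.pyGetD pvLabels (Int.ofNat (lo - 1)) "" ++ " (" ++ PySem.Int.toStr pts ++ ")"

-- ===== PRECONDITION & SPEC =====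
def Spec_convert_rank (pts : Int) (out : String) : Prop := out = convert_rank_alt pts
instance (pts : Int) (out : String) : Decidable (Spec_convert_rank pts out) := by unfold Spec_convert_rank; infer_instance

-- ===== CLAIM (what is proved, stated in full; the proofs are below) =====
def Claim_equal_convert_rank : Prop := ∀ (pts : Int), Dom_convert_rank pts → Spec_convert_rank pts (convert_rank pts)

-- ===== LEMMAS AND PROOFS =====
-- A's loop body as a named function (definitionally equal to the lambda in convert_rank)
def pvStep (pts : Int) : Option String → Int → Option String := fun acc i =>
  match acc with
  | some s => some s
  | none =>
    let p := PySem.List.pyGetD pvTableA (i - 1) ("", 0)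
    let q := PySem.List.pyGetD pvTableA i ("", 0)
    if p.2 ≤ pts ∧ pts < q.2 then
      some (p.1 ++ " (" ++ PySem.Int.toStr pts ++ ")")
    else none

theorem pv_foldl_some (pts : Int) (l : List Int) (s : String) :
    l.foldl (pvStep pts) (some s) = some s := by
  induction l with
  | nil => rfl
  | cons x l ih => exact ih

-- table facts, checked by computation
theorem pv_th_eq : ∀ k : Fin 31, (pvTableA.getD k.val ("", 0)).2 = pvThresholds.getD k.val 0 := by decide
theorem pv_lab_eq : ∀ k : Fin 30, (pvTableA.getD k.val ("", 0)).1 = PySem.List.pyGetD pvLabels (Int.ofNat k.val) "" := by decide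
theorem pv_mono : ∀ i j : Fin 31, i.val ≤ j.val → pvThresholds.getD i.val 0 ≤ pvThresholds.getD j.val 0 := by decide

-- A's linear scan, characterized by the count-style invariant of the first matching interval
theorem pv_scan (pts : Int) (m : Nat)
    (hm1 : ∀ j, j < m → pvThresholds.getD j 0 ≤ pts)
    (hm2 : ∀ j, m ≤ j → j < 31 → pts < pvThresholds.getD j 0) :
    ∀ n a : Nat, 31 - a = n → 1 ≤ a → a ≤ 31 →
    (PySem.List.pyRange (a : Int) 31 1).foldl (pvStep pts) none =
      (if 1 ≤ m ∧ a ≤ m ∧ m ≤ 30 then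
        some ((pvTableA.getD (m - 1) ("", 0)).1 ++ " (" ++ PySem.Int.toStr pts ++ ")")
      else none) := by
  intro n
  induction n with
  | zero =>
    intro a h0 h1 h2
    have ha : a = 31 := by omega
    subst ha
    rw [PySem.List.pyRange_one_eq_nil (by norm_num), if_neg (by omega)]
    rfl
  | succ n ih =>
    intro a h0 h1 h2
    have ha : (a : Int) < 31 := by exact_mod_cast (by omega : a < 31)
    rw [PySem.List.pyRange_one_cons ha, List.foldl_cons]
    have e1 : (a : Int) - 1 = ((a - 1 : Nat) : Int) := by omega
    by_cases hc : a = m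
    · have hcond : (PySem.List.pyGetD pvTableA ((a : Int) - 1) ("", 0)).2 ≤ pts ∧
          pts < (PySem.List.pyGetD pvTableA (a : Int) ("", 0)).2 := by
        rw [e1, PySem.List.pyGetD_natCast, PySem.List.pyGetD_natCast]
        constructor
        · rw [pv_th_eq ⟨a - 1, by omega⟩]
          exact hm1 (a - 1) (by omega)
        · rw [pv_th_eq ⟨a, by omega⟩]
          exact hm2 a (by omega) (by omega)
      have hstep : pvStep pts none (a : Int) =
          some ((pvTableA.getD (a - 1) ("", 0)).1 ++ " (" ++ PySem.Int.toStr pts ++ ")") := by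
        simp only [pvStep, if_pos hcond]
        rw [e1, PySem.List.pyGetD_natCast]
      rw [hstep, pv_foldl_some, if_pos (by omega)]
      subst hc
      rfl
    · have hstep : pvStep pts none (a : Int) = none := by
        simp only [pvStep]
        rw [if_neg]
        intro hcc
        rcases hcc with ⟨hc1, hc2⟩
        rw [e1, PySem.List.pyGetD_natCast] at hc1
        rw [PySem.List.pyGetD_natCast] at hc2
        rcases Nat.lt_or_ge a m with hlt | hge
        · rw [pv_th_eq ⟨a, by omega⟩] at hc2
          exact absurd hc2 (not_lt.mpr (hm1 a hlt))
        · rw [pv_th_eq ⟨a - 1, by omega⟩] at hc1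
          exact absurd hc1 (not_le.mpr (hm2 (a - 1) (by omega) (by omega)))
      rw [hstep]
      have e2 : (a : Int) + 1 = ((a + 1 : Nat) : Int) := by omega
      rw [e2, ih (a + 1) (by omega) (by omega) (by omega)]
      exact if_congr (by constructor <;> (intro h; exact ⟨h.1, by omega, h.2.2⟩)) rfl rfl

-- the binary search returns the count of thresholds ≤ pts, via the standard bracket invariant
theorem pv_bsr_inv (pts : Int) :
    ∀ n lo hi : Nat, hi - lo = n → lo ≤ hi → hi ≤ 31 →
    (∀ j, j < lo → pvThresholds.getD j 0 ≤ pts) →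
    (∀ j, hi ≤ j → j < 31 → pts < pvThresholds.getD j 0) →
    lo ≤ pvBsr pts lo hi ∧ pvBsr pts lo hi ≤ hi ∧
      (∀ j, j < pvBsr pts lo hi → pvThresholds.getD j 0 ≤ pts) ∧
      (∀ j, pvBsr pts lo hi ≤ j → j < 31 → pts < pvThresholds.getD j 0) := by
  intro n
  induction n using Nat.strong_induction_on with
  | _ n ih =>
    intro lo hi h0 h1 h2 hlo hhi
    rw [pvBsr.eq_def]
    by_cases hlh : lo < hi
    · rw [if_pos hlh]
      have hmidlt : (lo + hi) / 2 < hi := by omega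
      have hmidge : lo ≤ (lo + hi) / 2 := by omega
      have egd : PySem.List.pyGetD pvThresholds (Int.ofNat ((lo + hi) / 2)) 0 =
          pvThresholds.getD ((lo + hi) / 2) 0 := PySem.List.pyGetD_natCast _ _ _
      by_cases hc : PySem.List.pyGetD pvThresholds (Int.ofNat ((lo + hi) / 2)) 0 ≤ pts
      · rw [if_pos hc]
        rw [egd] at hc
        refine ?_
        have hr := ih (hi - ((lo + hi) / 2 + 1)) (by omega) ((lo + hi) / 2 + 1) hi rfl
          (by omega) h2
          (fun j hj => by
            rcases Nat.lt_or_ge j lo with h | h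
            · exact hlo j h
            · exact le_trans (pv_mono ⟨j, by omega⟩ ⟨(lo + hi) / 2, by omega⟩ (show j ≤ (lo + hi) / 2 by omega)) hc)
          hhi
        exact ⟨by omega, hr.2.1, hr.2.2.1, hr.2.2.2⟩
      · rw [if_neg hc]
        rw [egd] at hc
        have hc' : pts < pvThresholds.getD ((lo + hi) / 2) 0 := not_le.mp hc
        have hr := ih ((lo + hi) / 2 - lo) (by omega) lo ((lo + hi) / 2) rfl
          (by omega) (by omega) hlo
          (fun j hj hj31 =>
            lt_of_lt_of_le hc' (pv_mono ⟨(lo + hi) / 2, by omega⟩ ⟨j, by omega⟩ (show (lo + hi) / 2 ≤ j from hj)))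
        exact ⟨hr.1, by omega, hr.2.2.1, hr.2.2.2⟩
    · rw [if_neg hlh]
      have : lo = hi := by omega
      exact ⟨le_refl _, by omega, fun j hj => hlo j (by omega), fun j hj hj31 => hhi j (by omega) hj31⟩

theorem pv_eq (pts : Int) : convert_rank pts = convert_rank_alt pts := by
  obtain ⟨h0m, hm31, hm1, hm2⟩ := pv_bsr_inv pts 31 0 31 rfl (by omega) (by omega)
    (fun j hj => absurd hj (Nat.not_lt_zero j)) (fun j hj hj31 => absurd hj31 (by omega))
  have hA : convert_rank pts =
      match (PySem.List.pyRange ((1 : Nat) : Int) 31 1).foldl (pvStep pts) none with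
      | some s => s
      | none => if pts < 0 then "no rank" else PySem.Int.toStr pts := rfl
  have hB : convert_rank_alt pts =
      (if pvBsr pts 0 31 = 0 then "no rank"
       else if pvBsr pts 0 31 = 31 then PySem.Int.toStr pts
       else PySem.List.pyGetD pvLabels (Int.ofNat (pvBsr pts 0 31 - 1)) "" ++ " (" ++
         PySem.Int.toStr pts ++ ")") := rfl
  rw [hA, hB, pv_scan pts (pvBsr pts 0 31) hm1 hm2 30 1 rfl (by omega) (by omega)]
  by_cases hz : pvBsr pts 0 31 = 0
  · rw [if_neg (by omega), hz]
    have hneg : pts < 0 := by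
      have h := hm2 0 (by omega) (by omega)
      rw [show pvThresholds.getD 0 0 = (0 : Int) from rfl] at h
      exact h
    simp [hneg]
  · by_cases h31 : pvBsr pts 0 31 = 31
    · rw [if_neg (by omega), if_neg hz, h31]
      have hnn : ¬ pts < 0 := by
        have h := hm1 0 (by omega)
        rw [show pvThresholds.getD 0 0 = (0 : Int) from rfl] at h
        omega
      rw [if_neg hnn, if_pos rfl]
    · rw [if_pos (by omega), if_neg hz, if_neg h31]
      rw [pv_lab_eq ⟨pvBsr pts 0 31 - 1, by omega⟩]

-- ===== VERDICT (by name: the statement is the Claim_ definition above) =====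
theorem convert_rank_spec : Claim_equal_convert_rank := by
  intro pts _
  exact pv_eq pts
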